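-- pv_equiv track=rewrite | github.com/ArthurVM/BlooMine | bloomine/polyfamily.py | choose_best_probes
-- ===== SOURCE A (Python) =====
-- from typing import Dict, List, Tuple, Optional
--
-- ReadTuple = Tuple[str, str, int, int, int]
--
-- def choose_best_probes(all_reads: Dict[str, List[ReadTuple]]) -> Dict[str, str]:
--     """Return a mapping of read_id -> probe with the highest total score."""
--     best: Dict[str, Tuple[str, int]] = {}
--
--     for probe_id, tuples in all_reads.items():
--         for read_id, _seq, _s1, _s2, total in tuples:
--             current = best.get(read_id)
--             if current is None or total > current[1] or (total == current[1] and probe_id < current[0]):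
--                 best[read_id] = (probe_id, total)
--
--     return {read_id: probe for read_id, (probe, _score) in best.items()}
-- ===== SOURCE B (Python) =====
-- from typing import Dict, List, Tuple
--
-- ReadTuple = Tuple[str, str, int, int, int]
--
-- def choose_best_probes(all_reads: Dict[str, List[ReadTuple]]) -> Dict[str, str]:
--     """Group all (total, probe_id) candidates per read, then pick each read's best."""
--     candidates: Dict[str, List[Tuple[int, str]]] = {}
--     for probe_id, tuples in all_reads.items():
--         for read_id, _seq, _s1, _s2, total in tuples:
--             candidates.setdefault(read_id, []).append((total, probe_id))
--     return {read_id: min(cands, key=lambda p: (-p[0], p[1]))[1]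
--             for read_id, cands in candidates.items()}
-- ===== Notes on version B (the rewrite author's own statement) =====
-- stated objective: alternative
-- what changed: Replaces A's incremental running-best dict update with a two-pass build-table-then-reduce: first group every (total, probe_id) occurrence per read_id, then select each read's winner with min over the group keyed by (-total, probe_id).
import Mathlib
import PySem

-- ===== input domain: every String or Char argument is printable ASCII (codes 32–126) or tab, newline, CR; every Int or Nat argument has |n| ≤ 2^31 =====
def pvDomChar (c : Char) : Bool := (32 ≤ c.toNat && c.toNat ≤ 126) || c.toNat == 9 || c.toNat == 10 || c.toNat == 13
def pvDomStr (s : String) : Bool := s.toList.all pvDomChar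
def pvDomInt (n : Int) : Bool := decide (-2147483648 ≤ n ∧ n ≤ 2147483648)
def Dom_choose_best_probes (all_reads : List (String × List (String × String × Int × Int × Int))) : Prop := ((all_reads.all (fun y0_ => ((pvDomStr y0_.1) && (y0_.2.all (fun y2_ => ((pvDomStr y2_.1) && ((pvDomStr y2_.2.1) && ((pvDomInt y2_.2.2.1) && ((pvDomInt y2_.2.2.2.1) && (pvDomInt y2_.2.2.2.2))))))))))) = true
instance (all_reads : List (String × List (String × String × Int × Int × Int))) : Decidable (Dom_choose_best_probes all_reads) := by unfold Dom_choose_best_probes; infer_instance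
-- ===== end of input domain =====

-- B groups all (total, probe_id) candidates per read first, then reduces each group with min;
-- A keeps an incremental running best instead. Same results, alternative decomposition.

-- ===== PORT A =====
def choose_best_probes (all_reads : List (String × List (String × String × Int × Int × Int))) : List (String × String) :=
  let best : PySem.Dict String (String × Int) :=
    all_reads.foldl (fun best pr =>
      pr.2.foldl (fun best t =>
        match best.get? t.1 with
        | none => best.insert t.1 (pr.1, t.2.2.2.2)
        | some current =>
          if t.2.2.2.2 > current.2 ∨ (t.2.2.2.2 = current.2 ∧ pr.1 < current.1) then
            best.insert t.1 (pr.1, t.2.2.2.2)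
          else best) best) PySem.Dict.empty
  best.items.map (fun p => (p.1, p.2.1))

-- ===== PORT B =====
-- min(cands, key=lambda p: (-p[0], p[1]))[1]; the group is never empty where it is used,
-- the "" default is only a totality guard for the none case min2? cannot reach there.
def pvBestProbe (cands : List (Int × String)) : String :=
  match PySem.List.min2? cands (fun p => -p.1) (fun p => p.2) with
  | some m => m.2
  | none => ""

def choose_best_probes_alt (all_reads : List (String × List (String × String × Int × Int × Int))) : List (String × String) :=
  let candidates : PySem.Dict String (List (Int × String)) :=
    all_reads.foldl (fun d pr =>
      pr.2.foldl (fun d t => d.modify t.1 [] (· ++ [(t.2.2.2.2, pr.1)])) d) PySem.Dict.empty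
  candidates.items.map (fun p => (p.1, pvBestProbe p.2))

-- ===== PRECONDITION & SPEC =====
def Spec_choose_best_probes (all_reads : List (String × List (String × String × Int × Int × Int))) (out : List (String × String)) : Prop := out = choose_best_probes_alt all_reads
instance (all_reads : List (String × List (String × String × Int × Int × Int))) (out : List (String × String)) : Decidable (Spec_choose_best_probes all_reads out) := by unfold Spec_choose_best_probes; infer_instance

-- ===== CLAIM (what is proved, stated in full; the proofs are below) =====
def Claim_equal_choose_best_probes : Prop := ∀ (all_reads : List (String × List (String × String × Int × Int × Int))), Dom_choose_best_probes all_reads → Spec_choose_best_probes all_reads (choose_best_probes all_reads)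

-- ===== LEMMAS AND PROOFS =====

-- the flattened list of occurrences (read_id, (total, probe_id)) in traversal order
def pvOccs (all_reads : List (String × List (String × String × Int × Int × Int))) : List (String × Int × String) :=
  all_reads.flatMap (fun pr => pr.2.map (fun t => (t.1, t.2.2.2.2, pr.1)))

-- A's per-occurrence step
def pvStepA (d : PySem.Dict String (String × Int)) (x : String × Int × String) : PySem.Dict String (String × Int) :=
  match d.get? x.1 with
  | none => d.insert x.1 (x.2.2, x.2.1)
  | some current =>
    if x.2.1 > current.2 ∨ (x.2.1 = current.2 ∧ x.2.2 < current.1) then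
      d.insert x.1 (x.2.2, x.2.1)
    else d

-- A's running-best step on a single group, Option accumulator
def pvCombine (o : Option (String × Int)) (g : List (Int × String)) : Option (String × Int) :=
  g.foldl (fun o y =>
    match o with
    | none => some (y.2, y.1)
    | some current =>
      if y.1 > current.2 ∨ (y.1 = current.2 ∧ y.2 < current.1) then some (y.2, y.1) else o) o

theorem foldl_flatMap {α β γ : Type} (l : List α) (g : α → List β) (f : γ → β → γ) (init : γ) :
    (l.flatMap g).foldl f init = l.foldl (fun acc x => (g x).foldl f acc) init := by
  induction l generalizing init with
  | nil => rfl
  | cons h t ih => simp [List.flatMap_cons, List.foldl_append, ih]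

theorem chooseA_eq_foldl_occs (all_reads : List (String × List (String × String × Int × Int × Int))) :
    choose_best_probes all_reads =
      ((pvOccs all_reads).foldl pvStepA PySem.Dict.empty).items.map (fun p => (p.1, p.2.1)) := by
  unfold choose_best_probes pvOccs pvStepA
  rw [foldl_flatMap]
  simp [List.foldl_map]

theorem chooseB_eq_foldl_occs (all_reads : List (String × List (String × String × Int × Int × Int))) :
    choose_best_probes_alt all_reads =
      ((pvOccs all_reads).foldl (fun d x => d.modify x.1 [] (· ++ [x.2])) PySem.Dict.empty).items.map
        (fun p => (p.1, pvBestProbe p.2)) := by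
  unfold choose_best_probes_alt pvOccs
  rw [foldl_flatMap]
  simp [List.foldl_map]

theorem insert_self_eq (d : PySem.Dict String (String × Int)) (k : String) (v : String × Int)
    (hnd : d.keys.Nodup) (h : d.get? k = some v) : d.insert k v = d := by
  have hc : d.contains k = true := by
    rw [PySem.Dict.contains_eq_isSome_get?, h]; rfl
  apply PySem.Dict.ext
  rw [PySem.Dict.items_insert_of_contains d v hc]
  have hfix : ∀ p ∈ d.items, (if (p.1 == k) = true then (k, v) else p) = p := by
    intro p hp
    by_cases hk : p.1 = k
    · have hv : d.get? p.1 = some p.2 := PySem.Dict.get?_of_mem_items d (by simpa using hp) hnd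
      rw [hk, h] at hv
      have hv2 : p.2 = v := (Option.some_inj.mp hv).symm
      simp only [hk, beq_self_eq_true, if_true]
      rw [← hv2, ← hk]
    · simp [hk]
  calc d.items.map (fun p => if (p.1 == k) = true then (k, v) else p)
      = d.items.map id := List.map_congr_left hfix
    _ = d.items := List.map_id _

theorem stepA_eq_insert (d : PySem.Dict String (String × Int)) (x : String × Int × String)
    (hnd : d.keys.Nodup) :
    pvStepA d x = d.insert x.1 (match d.get? x.1 with
      | none => (x.2.2, x.2.1)
      | some current =>
        if x.2.1 > current.2 ∨ (x.2.1 = current.2 ∧ x.2.2 < current.1) then (x.2.2, x.2.1) else current) := by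
  unfold pvStepA
  cases h : d.get? x.1 with
  | none => simp
  | some cur =>
    dsimp only
    split_ifs with hc
    · rfl
    · exact (insert_self_eq d x.1 cur hnd h).symm

theorem nodup_stepA (d : PySem.Dict String (String × Int)) (x : String × Int × String)
    (hnd : d.keys.Nodup) : (pvStepA d x).keys.Nodup := by
  unfold pvStepA
  cases d.get? x.1 with
  | none => exact PySem.Dict.nodup_keys_insert _ _ _ hnd
  | some cur =>
    dsimp only
    split_ifs
    · exact PySem.Dict.nodup_keys_insert _ _ _ hnd
    · exact hnd

-- A's whole loop as an always-insert loop (needed to track key order)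
def pvFA (d : PySem.Dict String (String × Int)) (x : String × Int × String) : String × Int :=
  match d.get? x.1 with
  | none => (x.2.2, x.2.1)
  | some current =>
    if x.2.1 > current.2 ∨ (x.2.1 = current.2 ∧ x.2.2 < current.1) then (x.2.2, x.2.1) else current

theorem foldl_stepA_eq_insert_form (l : List (String × Int × String)) (d : PySem.Dict String (String × Int))
    (hnd : d.keys.Nodup) :
    l.foldl pvStepA d = l.foldl (fun d x => d.insert x.1 (pvFA d x)) d := by
  induction l generalizing d with
  | nil => rfl
  | cons x t ih =>
    rw [List.foldl_cons, List.foldl_cons, ih (pvStepA d x) (nodup_stepA d x hnd),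
        stepA_eq_insert d x hnd]
    rfl

theorem get?_foldl_stepA (l : List (String × Int × String)) (d : PySem.Dict String (String × Int)) (r : String) :
    (l.foldl pvStepA d).get? r = pvCombine (d.get? r) ((l.filter (fun x => x.1 == r)).map (·.2)) := by
  induction l generalizing d with
  | nil => rfl
  | cons x t ih =>
    rw [List.foldl_cons, ih]
    by_cases hx : x.1 = r
    · subst hx
      simp only [List.filter_cons, beq_self_eq_true, if_true, List.map_cons]
      have hstep : (pvStepA d x).get? x.1 = pvCombine (d.get? x.1) [x.2] := by
        unfold pvStepA pvCombine
        cases h : d.get? x.1 with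
        | none => simp [PySem.Dict.get?_insert_self]
        | some cur =>
          dsimp only [List.foldl_cons, List.foldl_nil]
          split_ifs with hc
          · simp [PySem.Dict.get?_insert_self]
          · exact h
      rw [hstep]
      unfold pvCombine
      rw [List.foldl_cons]
      rfl
    · have hfix : (pvStepA d x).get? r = d.get? r := by
        unfold pvStepA
        cases h : d.get? x.1 with
        | none => exact PySem.Dict.get?_insert_of_ne d _ (Ne.symm hx)
        | some cur =>
          dsimp only
          split_ifs with hc
          · exact PySem.Dict.get?_insert_of_ne d _ (Ne.symm hx)
          · rfl
      rw [hfix]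
      simp [hx]

-- A's running best over a group is Python's min with key (-total, probe_id), component-swapped
theorem combine_eq_min2 (g : List (Int × String)) (o : Option (Int × String)) :
    pvCombine (o.map (fun y => (y.2, y.1))) g =
      Option.map (fun y : Int × String => (y.2, y.1))
        (g.foldl (fun acc x =>
          match acc with
          | none => some x
          | some m =>
            if (decide ((fun p : Int × String => -p.1) x < (fun p : Int × String => -p.1) m) ||
                !decide ((fun p : Int × String => -p.1) m < (fun p : Int × String => -p.1) x) &&
                decide ((fun p : Int × String => p.2) x < (fun p : Int × String => p.2) m)) = true
            then some x else some m) o) := by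
  induction g generalizing o with
  | nil => rfl
  | cons y t ih =>
    unfold pvCombine
    rw [List.foldl_cons, List.foldl_cons]
    cases o with
    | none => exact ih (some y)
    | some m =>
      simp only [Option.map_some]
      have hcond : (y.1 > m.1 ∨ (y.1 = m.1 ∧ y.2 < m.2)) ↔
          (-y.1 < -m.1 ∨ (¬(-m.1 < -y.1) ∧ y.2 < m.2)) := by
        constructor
        · rintro (h | ⟨h, hs⟩)
          · exact Or.inl (by omega)
          · exact Or.inr ⟨by omega, hs⟩
        · rintro (h | ⟨h, hs⟩)
          · exact Or.inl (by omega)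
          · by_cases hgt : y.1 > m.1
            · exact Or.inl hgt
            · exact Or.inr ⟨by omega, hs⟩
      by_cases hc : y.1 > m.1 ∨ (y.1 = m.1 ∧ y.2 < m.2)
      · rw [if_pos hc, if_pos (by simpa using hcond.mp hc)]
        exact ih (some y)
      · have hnb : ¬(-y.1 < -m.1 ∨ (¬(-m.1 < -y.1) ∧ y.2 < m.2)) := fun hb => hc (hcond.mpr hb)
        rw [if_neg hc, if_neg (by simpa using hnb)]
        exact ih (some m)

theorem combine_none_eq_min2 (g : List (Int × String)) :
    pvCombine none g =
      Option.map (fun y : Int × String => (y.2, y.1))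
        (PySem.List.min2? g (fun p => -p.1) (fun p => p.2)) := by
  have h := combine_eq_min2 g none
  simp only [Option.map_none] at h
  rw [h]
  unfold PySem.List.min2?
  congr 1
  apply PySem.List.foldl_congr_mem
  intro acc x _
  cases acc with
  | none => rfl
  | some m =>
    by_cases h1 : (-x.1 : Int) < -m.1 <;> by_cases h2 : (-m.1 : Int) < -x.1 <;>
      by_cases h3 : x.2 < m.2 <;> simp [h1, h2, h3]

theorem combine_some_isSome (t : List (Int × String)) (c : String × Int) :
    ∃ c', pvCombine (some c) t = some c' := by
  induction t generalizing c with
  | nil => exact ⟨c, rfl⟩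
  | cons y s ih =>
    unfold pvCombine
    rw [List.foldl_cons]
    dsimp only
    split_ifs
    · exact ih _
    · exact ih _

theorem choose_best_probes_spec' (all_reads : List (String × List (String × String × Int × Int × Int))) :
    choose_best_probes all_reads = choose_best_probes_alt all_reads := by
  rw [chooseA_eq_foldl_occs, chooseB_eq_foldl_occs]
  have hA := foldl_stepA_eq_insert_form (pvOccs all_reads) PySem.Dict.empty PySem.Dict.nodup_keys_empty
  have hndA : ((pvOccs all_reads).foldl pvStepA PySem.Dict.empty).keys.Nodup := by
    rw [hA]
    exact PySem.Dict.nodup_keys_foldl_insert_key _ (fun x => x.1) pvFA _ PySem.Dict.nodup_keys_empty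
  have hndB : ((pvOccs all_reads).foldl (fun d x => d.modify x.1 [] (· ++ [x.2])) PySem.Dict.empty).keys.Nodup := by
    exact PySem.Dict.nodup_keys_foldl_modify_key (ν := List (Int × String)) (pvOccs all_reads)
      (fun x => x.1) [] (fun _ x v => v ++ [x.2]) PySem.Dict.empty PySem.Dict.nodup_keys_empty
  have hkA : ((pvOccs all_reads).foldl pvStepA PySem.Dict.empty).keys
      = PySem.Set.ofList ((pvOccs all_reads).map (fun x => x.1)) := by
    rw [hA, PySem.Dict.keys_foldl_insert_key, PySem.Set.ofList_eq_foldl]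
    rfl
  have hkB : ((pvOccs all_reads).foldl (fun d x => d.modify x.1 [] (· ++ [x.2])) PySem.Dict.empty).keys
      = PySem.Set.ofList ((pvOccs all_reads).map (fun x => x.1)) := by
    rw [PySem.Dict.keys_foldl_modify_key (pvOccs all_reads) (fun x => x.1) [] (fun _ x v => v ++ [x.2]),
        PySem.Set.ofList_eq_foldl]
    rfl
  rw [PySem.Dict.items_eq_map_keys _ hndA ("", 0), PySem.Dict.items_eq_map_keys _ hndB []]
  rw [hkA, hkB, List.map_map, List.map_map]
  apply List.map_congr_left
  intro k hk
  simp only [Function.comp]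
  have hkmem : k ∈ (pvOccs all_reads).map (fun x => x.1) :=
    (PySem.Set.mem_ofList _ _).mp hk
  have hgrp : ((pvOccs all_reads).filter (fun x => x.1 == k)).map (·.2) ≠ [] := by
    obtain ⟨x, hxmem, hx1⟩ := List.exists_of_mem_map hkmem
    intro hnil
    have : x ∈ (pvOccs all_reads).filter (fun x => x.1 == k) :=
      List.mem_filter.mpr ⟨hxmem, by simp [hx1]⟩
    rw [List.map_eq_nil_iff.mp hnil] at this
    exact absurd this (List.not_mem_nil)
  set g : List (Int × String) := ((pvOccs all_reads).filter (fun x => x.1 == k)).map (·.2) with hg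
  have hgetA : ((pvOccs all_reads).foldl pvStepA PySem.Dict.empty).get? k = pvCombine none g := by
    rw [get?_foldl_stepA, PySem.Dict.get?_empty, ← hg]
  have hgetB : ((pvOccs all_reads).foldl (fun d x => d.modify x.1 [] (· ++ [x.2])) PySem.Dict.empty).getD k [] = g := by
    have := PySem.Dict.getD_foldl_modify_append (pvOccs all_reads) PySem.Dict.empty k
    simpa [PySem.Dict.getD_empty, ← hg] using this
  obtain ⟨y, t, hgl⟩ := List.exists_cons_of_ne_nil hgrp
  have hcomb : ∃ c', pvCombine none g = some c' := by
    rw [hgl]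
    unfold pvCombine
    rw [List.foldl_cons]
    exact combine_some_isSome t (y.2, y.1)
  obtain ⟨c, hc⟩ := hcomb
  have hm2 := combine_none_eq_min2 g
  rw [hc] at hm2
  cases hmin : PySem.List.min2? g (fun p => -p.1) (fun p => p.2) with
  | none => rw [hmin] at hm2; exact absurd hm2 (by simp)
  | some m =>
    rw [hmin] at hm2
    have hcm : c = (m.2, m.1) := by simpa using hm2
    rw [PySem.Dict.getD_eq_get?_getD, hgetA, hgetB, hc, hcm]
    unfold pvBestProbe
    rw [hmin]
    rfl

-- ===== VERDICT (by name: the statement is the Claim_ definition above) =====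
theorem choose_best_probes_spec : Claim_equal_choose_best_probes := by
  intro all_reads _
  exact choose_best_probes_spec' all_reads
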